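-- pv_equiv track=rewrite | github.com/sijia66/adaptive_feature_selection | behaviour_metrics.py | segment_trials_in_state_log
-- ===== SOURCE A (Python) =====
-- def segment_trials_in_state_log(state_log,
--                       trial_end_states = ['reward', 'timeout_penalty', 'hold_penalty']):
--
--     segmented_trials = list()
--
--     single_trial_states = list()
--
--     for s in state_log:
--         state_name = s[0]
--
--         if state_name in trial_end_states:
--             single_trial_states.append(s)
--             segmented_trials.append(single_trial_states)
--             single_trial_states = list()
--
--         else:
--             single_trial_states.append(s)
--
--     return segmented_trials
-- ===== SOURCE B (Python) =====
-- def segment_trials_in_state_log(state_log,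
--                       trial_end_states = ['reward', 'timeout_penalty', 'hold_penalty']):
--     state_log = list(state_log)
--     end_idxs = [i for i, s in enumerate(state_log) if s[0] in trial_end_states]
--     out = []
--     start = 0
--     for idx in end_idxs:
--         out.append(state_log[start:idx + 1])
--         start = idx + 1
--     return out
-- ===== Notes on version B (the rewrite author's own statement) =====
-- stated objective: alternative
-- what changed: B replaces A's single accumulator loop (growing a current-trial buffer and flushing it at each end state) with a two-phase index/slice decomposition: one pass collects the positions of end states, then the trials are produced as slices between consecutive boundaries; states after the last end state are never sliced, matching A's dropping of a trailing partial trial.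
import Mathlib
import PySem

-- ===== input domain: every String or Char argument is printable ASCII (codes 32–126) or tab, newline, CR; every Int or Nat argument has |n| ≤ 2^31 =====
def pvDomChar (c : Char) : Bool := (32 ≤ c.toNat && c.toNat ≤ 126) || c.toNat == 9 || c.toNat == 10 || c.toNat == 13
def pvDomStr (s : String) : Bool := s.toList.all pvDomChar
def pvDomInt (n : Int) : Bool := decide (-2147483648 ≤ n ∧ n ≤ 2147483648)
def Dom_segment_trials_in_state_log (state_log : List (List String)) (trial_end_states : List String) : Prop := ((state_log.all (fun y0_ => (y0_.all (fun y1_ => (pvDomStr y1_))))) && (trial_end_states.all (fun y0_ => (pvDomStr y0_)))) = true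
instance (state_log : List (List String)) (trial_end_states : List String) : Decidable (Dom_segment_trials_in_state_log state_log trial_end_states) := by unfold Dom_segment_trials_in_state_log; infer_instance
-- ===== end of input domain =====

-- B splits the log by slicing between precollected end-state indices instead of growing/flushing a trial buffer (alternative decomposition, same cost).


-- ===== PORT A =====
-- Literal port of A: one foldl over state_log carrying (segmented_trials, single_trial_states).
-- s[0] is PySem.List.pyGet? s 0; Pre_ excludes empty rows, where Python raises IndexError, so .getD "" is never reached on admitted inputs.
def segment_trials_in_state_log (state_log : List (List String)) (trial_end_states : List String) : List (List (List String)) :=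
  (state_log.foldl
    (fun (st : List (List (List String)) × List (List String)) s =>
      let state_name := (PySem.List.pyGet? s 0).getD ""
      if trial_end_states.contains state_name then
        (st.1 ++ [st.2 ++ [s]], [])
      else
        (st.1, st.2 ++ [s]))
    ([], [])).1

-- ===== PORT B =====
-- Literal port of B: collect end-state indices via enumerate+filter, then fold over them producing slices.
def segment_trials_in_state_log_alt (state_log : List (List String)) (trial_end_states : List String) : List (List (List String)) :=
  let end_idxs := ((PySem.List.enumerate state_log 0).filter
      (fun p => trial_end_states.contains ((PySem.List.pyGet? p.2 0).getD ""))).map (·.1)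
  (end_idxs.foldl
    (fun (st : List (List (List String)) × Int) idx =>
      (st.1 ++ [PySem.List.slice state_log (some st.2) (some (idx + 1))], idx + 1))
    ([], 0)).1

-- ===== PRECONDITION & SPEC =====
-- Pre_ excludes only inputs with an empty row, where both Pythons raise IndexError on s[0].
def Pre_segment_trials_in_state_log (state_log : List (List String)) (trial_end_states : List String) : Prop :=
  ∀ s ∈ state_log, s ≠ []
instance (state_log : List (List String)) (trial_end_states : List String) : Decidable (Pre_segment_trials_in_state_log state_log trial_end_states) := by unfold Pre_segment_trials_in_state_log; infer_instance

def pvWitness_segment_trials_in_state_log : List (List String) × List String :=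
  ([["wait", "1"], ["reward", "2"], ["wait", "3"]], ["reward", "timeout_penalty", "hold_penalty"])

def Spec_segment_trials_in_state_log (state_log : List (List String)) (trial_end_states : List String) (out : List (List (List String))) : Prop := out = segment_trials_in_state_log_alt state_log trial_end_states
instance (state_log : List (List String)) (trial_end_states : List String) (out : List (List (List String))) : Decidable (Spec_segment_trials_in_state_log state_log trial_end_states out) := by unfold Spec_segment_trials_in_state_log; infer_instance

-- ===== CLAIM (what is proved, stated in full; the proofs are below) =====
def Claim_equal_segment_trials_in_state_log : Prop := ∀ (state_log : List (List String)) (trial_end_states : List String), Dom_segment_trials_in_state_log state_log trial_end_states → Pre_segment_trials_in_state_log state_log trial_end_states → Spec_segment_trials_in_state_log state_log trial_end_states (segment_trials_in_state_log state_log trial_end_states)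

-- ===== LEMMAS AND PROOFS =====

-- Reference recursive segmentation both ports are reduced to: cur is the pending partial trial.
def segSpec (ends : List String) : List (List String) → List (List String) → List (List (List String))
  | _, [] => []
  | cur, s :: rest =>
    if ends.contains ((PySem.List.pyGet? s 0).getD "") then
      (cur ++ [s]) :: segSpec ends [] rest
    else segSpec ends (cur ++ [s]) rest

lemma aFold_eq (ends : List String) :
    ∀ (log : List (List String)) (seg0 : List (List (List String))) (cur : List (List String)),
    (log.foldl
      (fun (st : List (List (List String)) × List (List String)) s =>
        let state_name := (PySem.List.pyGet? s 0).getD ""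
        if ends.contains state_name then
          (st.1 ++ [st.2 ++ [s]], [])
        else
          (st.1, st.2 ++ [s]))
      (seg0, cur)).1 = seg0 ++ segSpec ends cur log := by
  intro log
  induction log with
  | nil => intro seg0 cur; simp [segSpec]
  | cons s rest ih =>
    intro seg0 cur
    simp only [List.foldl_cons, List.contains_eq_mem, decide_eq_true_eq] at ih ⊢
    by_cases h : ((PySem.List.pyGet? s 0).getD "") ∈ ends
    · simp only [h, if_true]
      rw [ih (seg0 ++ [cur ++ [s]]) []]
      simp [segSpec, h]
    · simp only [h, if_false]
      rw [ih seg0 (cur ++ [s])]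
      simp [segSpec, h]

lemma slice_pre_cons (pre : List (List String)) (s : List String) (rest : List (List String)) (k : Nat) (hk : k ≤ pre.length) :
    PySem.List.slice (pre ++ s :: rest) (some (k : Int)) (some ((pre.length : Int) + 1)) =
      pre.drop k ++ [s] := by
  have h1 : ((pre.length : Int) + 1) = (((pre.length + 1 : Nat)) : Int) := by push_cast; ring
  rw [h1, PySem.List.slice_natCast]
  rw [List.drop_append_of_le_length hk]
  have h2 : pre.length + 1 - k = (pre.drop k).length + 1 := by
    simp [List.length_drop]; omega
  rw [h2, List.take_append]
  simp

lemma bFold_eq (ends : List String) :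
    ∀ (suf pre : List (List String)) (k : Nat) (out : List (List (List String))), k ≤ pre.length →
    ((((PySem.List.enumerate suf (pre.length : Int)).filter
        (fun p => ends.contains ((PySem.List.pyGet? p.2 0).getD ""))).map (·.1)).foldl
      (fun (st : List (List (List String)) × Int) idx =>
        (st.1 ++ [PySem.List.slice (pre ++ suf) (some st.2) (some (idx + 1))], idx + 1))
      (out, (k : Int))).1
    = out ++ segSpec ends (pre.drop k) suf := by
  intro suf
  induction suf with
  | nil => intro pre k out hk; simp [PySem.List.enumerate_nil, segSpec]
  | cons s rest ih =>
    intro pre k out hk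
    rw [PySem.List.enumerate_cons]
    simp only [List.contains_eq_mem] at ih ⊢
    have hpre : pre ++ s :: rest = (pre ++ [s]) ++ rest := by simp
    have hlen : (pre.length : Int) + 1 = (((pre ++ [s]).length : Nat) : Int) := by
      simp
    by_cases h : ((PySem.List.pyGet? s 0).getD "") ∈ ends
    · simp only [List.filter_cons, h, if_true, List.map_cons, List.foldl_cons, decide_true]
      rw [slice_pre_cons pre s rest k hk]
      rw [hlen, hpre]
      rw [ih (pre ++ [s]) (pre ++ [s]).length (out ++ [pre.drop k ++ [s]]) (le_refl _)]
      simp [segSpec, h]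
    · simp only [List.filter_cons, h, decide_false, Bool.false_eq_true, if_false]
      rw [hlen, hpre]
      have hk' : k ≤ (pre ++ [s]).length := by simp; omega
      rw [ih (pre ++ [s]) k out hk']
      have hd : (pre ++ [s]).drop k = pre.drop k ++ [s] := List.drop_append_of_le_length hk
      rw [hd]
      simp [segSpec, h]

-- ===== VERDICT (by name: the statement is the Claim_ definition above) =====
theorem segment_trials_in_state_log_spec : Claim_equal_segment_trials_in_state_log := by
  intro log ends _ _
  unfold Spec_segment_trials_in_state_log segment_trials_in_state_log segment_trials_in_state_log_alt
  rw [aFold_eq ends log [] []]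
  have h := bFold_eq ends log [] 0 [] (by simp)
  simp only [List.length_nil, Nat.cast_zero, List.nil_append, List.drop_nil] at h ⊢
  rw [h]
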